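-- pv_equiv track=rewrite | github.com/laozigan/Graduation-Project | src/sensitive_detection/detector.py | _filter_phone_matches
-- ===== SOURCE A (Python) =====
-- def _filter_phone_matches(phone_matches, id_matches):
--     if not phone_matches or not id_matches:
--         return phone_matches
--     filtered = []
--     for phone in phone_matches:
--         if any(phone in id_value for id_value in id_matches):
--             continue
--         filtered.append(phone)
--     return filtered
-- ===== SOURCE B (Python) =====
-- def _filter_phone_matches(phone_matches, id_matches):
--     survivors = list(phone_matches)
--     for id_value in id_matches:
--         survivors = [p for p in survivors if p not in id_value]
--     return survivors
-- ===== Notes on version B (the rewrite author's own statement) =====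
-- stated objective: alternative
-- what changed: B swaps the loop nesting: instead of scanning all id_matches for each phone, it folds over id_matches once, successively filtering the surviving phones against each id; no empty-list special case is needed.
import Mathlib
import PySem

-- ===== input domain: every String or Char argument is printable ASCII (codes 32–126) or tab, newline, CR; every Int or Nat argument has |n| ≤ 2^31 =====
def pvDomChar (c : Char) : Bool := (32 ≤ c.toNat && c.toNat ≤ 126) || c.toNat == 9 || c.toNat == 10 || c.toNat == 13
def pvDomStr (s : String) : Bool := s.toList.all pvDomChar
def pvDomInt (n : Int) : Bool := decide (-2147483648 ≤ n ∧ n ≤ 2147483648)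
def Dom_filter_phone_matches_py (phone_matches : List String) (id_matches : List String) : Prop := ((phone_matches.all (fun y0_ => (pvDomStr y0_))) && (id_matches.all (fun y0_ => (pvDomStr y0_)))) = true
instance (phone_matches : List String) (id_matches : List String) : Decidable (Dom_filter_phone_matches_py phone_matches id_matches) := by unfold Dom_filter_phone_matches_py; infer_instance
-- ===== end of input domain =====

-- ===== PORT A =====
-- B swaps the loop nesting: one fold over id_matches filtering the surviving phones (alternative decomposition, same cost).
def filter_phone_matches_py (phone_matches : List String) (id_matches : List String) : List String :=
  if phone_matches = [] ∨ id_matches = [] then phone_matches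
  else
    phone_matches.foldl (fun filtered phone =>
      if id_matches.any (fun id_value => PySem.Str.isIn phone id_value) then filtered
      else filtered ++ [phone]) []

-- ===== PORT B =====
def filter_phone_matches_py_alt (phone_matches : List String) (id_matches : List String) : List String :=
  id_matches.foldl
    (fun survivors id_value => survivors.filter (fun p => !(PySem.Str.isIn p id_value)))
    phone_matches

-- ===== PRECONDITION & SPEC =====
def Spec_filter_phone_matches_py (phone_matches : List String) (id_matches : List String) (out : List String) : Prop := out = filter_phone_matches_py_alt phone_matches id_matches
instance (phone_matches : List String) (id_matches : List String) (out : List String) : Decidable (Spec_filter_phone_matches_py phone_matches id_matches out) := by unfold Spec_filter_phone_matches_py; infer_instance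

-- ===== CLAIM (what is proved, stated in full; the proofs are below) =====
def Claim_equal_filter_phone_matches_py : Prop := ∀ (phone_matches : List String) (id_matches : List String), Dom_filter_phone_matches_py phone_matches id_matches → Spec_filter_phone_matches_py phone_matches id_matches (filter_phone_matches_py phone_matches id_matches)

-- ===== LEMMAS AND PROOFS =====

theorem alt_eq_filter (id_matches : List String) (pm : List String) :
    filter_phone_matches_py_alt pm id_matches
      = pm.filter (fun p => id_matches.all (fun id_value => !(PySem.Str.isIn p id_value))) := by
  induction id_matches generalizing pm with
  | nil => simp [filter_phone_matches_py_alt]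
  | cons i t ih =>
      simp only [filter_phone_matches_py_alt, List.foldl_cons] at *
      rw [ih]
      simp [List.filter_filter, Bool.and_comm]

theorem a_loop_eq_filter (c : String → Bool) (l : List String) (acc : List String) :
    l.foldl (fun a x => if c x then a else a ++ [x]) acc = acc ++ l.filter (fun x => !(c x)) := by
  have h : (fun (a : List String) x => if c x then a else a ++ [x])
      = (fun (a : List String) x => if (!(c x)) then a ++ [x] else a) := by
    funext a x; cases hc : c x <;> simp
  rw [h, PySem.List.foldl_append_if_eq_filter]

-- ===== VERDICT (by name: the statement is the Claim_ definition above) =====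
theorem filter_phone_matches_py_spec : Claim_equal_filter_phone_matches_py := by
  intro pm ids _
  unfold Spec_filter_phone_matches_py filter_phone_matches_py
  rw [alt_eq_filter]
  split_ifs with h
  · rcases h with h | h <;> subst h <;> simp
  · rw [a_loop_eq_filter]
    simp only [List.nil_append]
    apply List.filter_congr
    intro p _
    simp only [List.all_eq, List.any_eq]
    rw [← decide_not, decide_eq_decide]
    simp [Bool.not_eq_true]
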